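-- pv_equiv track=rewrite | github.com/amitsinhaUK/coding-interview-questions | python-code/graphs_undirected-union-find/union-find.py | is_valid_tree
-- ===== SOURCE A (Python) =====
-- def _cycle_in_graph(graph: list, seen: dict, index: int, parent: int) -> bool:
--     seen[index] = True
--
--     for node in graph[index]:
--
--         if node not in seen.keys():
--             if _cycle_in_graph(graph=graph, seen=seen, index = node, parent = index):
--                 return True
--
--         elif parent != node:
--             return True
--
--     return False
--
-- def is_valid_tree(set: list, graph: list) -> bool:
--     root = set[0]
--
--     for i in range(0, len(set)):
--         if set[i] != root:
--             return False
--
--     if _cycle_in_graph(graph = graph, seen = {}, index = 0, parent = -1):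
--         return False
--
--     return True
-- ===== SOURCE B (Python) =====
-- def is_valid_tree(set: list, graph: list) -> bool:
--     root = set[0]
--     if any(v != root for v in set):
--         return False
--     # iterative DFS with an explicit stack of (node, parent, next-neighbour-index) frames
--     seen = {0: True}
--     stack = [(0, -1, 0)]
--     while stack:
--         node, parent, i = stack.pop()
--         row = graph[node]
--         if i < len(row):
--             nxt = row[i]
--             stack.append((node, parent, i + 1))
--             if nxt in seen:
--                 if nxt != parent:
--                     return False
--             else:
--                 seen[nxt] = True
--                 stack.append((nxt, node, 0))
--     return True
-- ===== Notes on version B (the rewrite author's own statement) =====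
-- stated objective: alternative
-- what changed: The recursive parent-excluding DFS cycle check is replaced by an iterative DFS over an explicit stack of (node, parent, next-neighbour-index) frames, and the index loop over set is replaced by an any() scan; the traversal order and mark-on-visit timing are identical, so the returned boolean is the same.
-- outside the precondition, e.g. on is_valid_tree([0, 0], [[], [5]]): A returns True, B returns True
import Mathlib
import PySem

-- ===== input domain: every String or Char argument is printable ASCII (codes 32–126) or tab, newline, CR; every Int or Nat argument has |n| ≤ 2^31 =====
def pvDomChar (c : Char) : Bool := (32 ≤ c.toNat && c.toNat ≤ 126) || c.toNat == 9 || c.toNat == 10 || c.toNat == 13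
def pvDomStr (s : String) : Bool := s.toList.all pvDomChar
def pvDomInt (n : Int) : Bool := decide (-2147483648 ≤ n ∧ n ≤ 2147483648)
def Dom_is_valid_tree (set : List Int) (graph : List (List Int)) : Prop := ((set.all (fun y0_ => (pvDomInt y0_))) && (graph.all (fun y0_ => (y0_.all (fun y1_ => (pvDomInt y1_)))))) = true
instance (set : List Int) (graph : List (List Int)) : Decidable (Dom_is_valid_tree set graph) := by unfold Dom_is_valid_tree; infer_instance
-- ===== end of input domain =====

-- ===== PORT A =====
-- B is an alternative decomposition: the recursive DFS cycle check becomes an iterative DFS over an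
-- explicit stack of (node, parent, next-neighbour-index) frames; same traversal, same return value.

-- _cycle_in_graph, transliterated.  The neighbour loop 'for node in graph[index]' is the recursion on
-- 'pending' (the not-yet-scanned suffix of graph[index]); entering an unseen node fetches its row and
-- recurses on it with parent := index, threading the mutated 'seen' dict.  'fuel' is a totality guard
-- on recursion depth only (Python has no such bound); 'none' = the guard tripped or graph[node] raised
-- IndexError, both impossible under Pre_is_valid_tree.
def cycA (graph : List (List Int)) : Nat → List Int → PySem.Dict Int Bool → Int → Int →
    Option (Bool × PySem.Dict Int Bool)
  | _fuel, [], seen, _index, _parent => some (false, seen)            -- loop finished: return False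
  | fuel, node :: rest, seen, index, parent =>
    if seen.contains node then
      if parent ≠ node then some (true, seen)                         -- elif parent != node: return True
      else cycA graph fuel rest seen index parent
    else
      match _hfe : fuel with
      | 0 => none
      | f + 1 =>
        match PySem.List.pyGet? graph node with                       -- graph[node] of the recursive call
        | none => none
        | some row =>
          match cycA graph f row (seen.insert node true) node index with
          | none => none
          | some (true, s) => some (true, s)                          -- return True
          | some (false, s) => cycA graph fuel rest s index parent    -- continue the for loop
termination_by fuel pending _ _ _ => (fuel, pending.length)
decreasing_by
  · exact Prod.Lex.right _ (Nat.lt_succ_self _)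
  · exact Prod.Lex.left _ _ (Nat.lt_succ_self _)
  · subst _hfe; exact Prod.Lex.right _ (Nat.lt_succ_self _)

-- for i in range(0, len(set)): if set[i] != root: return False
def scanA (set : List Int) (root : Int) : List Int → Bool
  | [] => true
  | i :: rest => if PySem.List.pyGetD set i root ≠ root then false else scanA set root rest

def is_valid_tree (set : List Int) (graph : List (List Int)) : Bool :=
  match PySem.List.pyGet? set 0 with
  | none => false                                                     -- set[0]: IndexError, outside Pre_
  | some root =>
    if scanA set root (PySem.List.pyRange 0 (set.length : Int) 1) then
      -- _cycle_in_graph(graph, {}, 0, -1): node 0 is processed as the sole pending neighbour of a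
      -- virtual caller with index -1, so the real call gets index = 0, parent = -1 as in Python.
      match cycA graph (graph.flatten.length + 2) [0] PySem.Dict.empty (-1) (-1) with
      | none => false                                                 -- unreachable under Pre_
      | some (true, _) => false
      | some (false, _) => true
    else false

-- ===== PORT B =====
-- helpers for loopB's termination measure (no fuel: the measure is
-- (#pool nodes not yet seen, total remaining neighbour work on the stack), lexicographically)
def poolB (graph : List (List Int)) : List Int := (0 : Int) :: graph.flatten

def ucnt (graph : List (List Int)) (seen : PySem.Dict Int Bool) : Nat :=
  ((poolB graph).filter (fun k => !(seen.contains k))).length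

def frameW (graph : List (List Int)) (f : Int × Int × Nat) : Nat :=
  ((PySem.List.pyGet? graph f.1).getD []).length - f.2.2 + 1

def stackW (graph : List (List Int)) (stack : List (Int × Int × Nat)) : Nat :=
  (stack.map (frameW graph)).sum

theorem filter_len_le {α : Type} (l : List α) (p q : α → Bool)
    (h : ∀ x, q x = true → p x = true) : (l.filter q).length ≤ (l.filter p).length := by
  induction l with
  | nil => simp
  | cons a t ih =>
    cases hq : q a
    · cases hp : p a <;> simp [hq, hp] <;> omega
    · simp [hq, h a hq]; omega

theorem filter_len_lt {α : Type} (l : List α) (p q : α → Bool)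
    (h : ∀ x, q x = true → p x = true) (a : α) (ha : a ∈ l) (hpa : p a = true)
    (hqa : q a = false) : (l.filter q).length < (l.filter p).length := by
  induction l with
  | nil => cases ha
  | cons b t ih =>
    rcases List.mem_cons.mp ha with rfl | hmem
    · have := filter_len_le t p q h
      simp [hpa, hqa]; omega
    · have := ih hmem
      cases hq : q b
      · cases hp : p b <;> simp [hq, hp] <;> omega
      · simp [hq, h b hq]; omega

theorem ucnt_insert_lt (graph : List (List Int)) (seen : PySem.Dict Int Bool) (k : Int)
    (hk : k ∈ poolB graph) (hs : seen.contains k = false) :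
    ucnt graph (seen.insert k true) < ucnt graph seen := by
  refine filter_len_lt _ _ _ ?_ k hk (by simp [hs]) (by simp)
  intro x hx
  simp only [Bool.not_eq_true', PySem.Dict.contains_insert] at hx ⊢
  cases h : seen.contains x
  · rfl
  · simp [h] at hx

-- the while loop of B; frames are (node, parent, i) with i the next index into graph[node];
-- 'none' = graph[node] raised IndexError (outside Pre_is_valid_tree)
def loopB (graph : List (List Int)) : List (Int × Int × Nat) → PySem.Dict Int Bool → Option Bool
  | [], _seen => some true                                            -- stack empty: return True
  | (node, parent, i) :: stack, seen =>
    if hnone : (PySem.List.pyGet? graph node).isNone then none        -- row = graph[node]: IndexError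
    else
      -- (PySem.List.pyGet? graph node).getD [] is the fetched row (exact here: the option is not none)
      if hi : i < ((PySem.List.pyGet? graph node).getD []).length then
        let nxt := ((PySem.List.pyGet? graph node).getD [])[i]
        if seen.contains nxt then
          if nxt ≠ parent then some false                             -- cycle: return False
          else loopB graph ((node, parent, i + 1) :: stack) seen
        else loopB graph ((nxt, node, 0) :: (node, parent, i + 1) :: stack) (seen.insert nxt true)
      else loopB graph stack seen                                     -- frame exhausted: pop it
termination_by stack seen => (ucnt graph seen, stackW graph stack)
decreasing_by
  · apply Prod.Lex.right
    simp only [stackW, List.map, frameW, List.sum_cons]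
    omega
  · apply Prod.Lex.left
    have hrow : PySem.List.pyGet? graph node =
        some ((PySem.List.pyGet? graph node).getD []) := by
      cases h : PySem.List.pyGet? graph node <;> simp_all
    exact ucnt_insert_lt graph seen _
      (List.mem_cons_of_mem _ (List.mem_flatten.mpr
        ⟨_, PySem.List.mem_of_pyGet?_eq_some _ hrow, List.getElem_mem hi⟩))
      (by simpa using ‹¬ seen.contains _ = true›)
  · apply Prod.Lex.right
    simp only [stackW, List.map, frameW, List.sum_cons]
    omega

def is_valid_tree_alt (set : List Int) (graph : List (List Int)) : Bool :=
  match PySem.List.pyGet? set 0 with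
  | none => false                                                     -- set[0]: IndexError, outside Pre_
  | some root =>
    if set.any (fun v => v ≠ root) then false
    else
      match loopB graph [(0, -1, 0)] (PySem.Dict.empty.insert 0 true) with
      | none => false                                                 -- unreachable under Pre_
      | some b => b

-- ===== PRECONDITION & SPEC =====
-- Pre_ excludes inputs where A raises IndexError: an empty set (set[0]), and — when the equal-root scan
-- passes, so the DFS actually runs — an empty graph (graph[0]) or an adjacency entry outside
-- [-len(graph), len(graph)); this conservatively also excludes graphs whose out-of-range entries sit
-- only in rows the DFS never reaches (A returns normally there).
def Pre_is_valid_tree (set : List Int) (graph : List (List Int)) : Prop :=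
  set ≠ [] ∧
  ((∀ v ∈ set, v = set.headI) →
    graph ≠ [] ∧ ∀ row ∈ graph, ∀ v ∈ row, PySem.Raise.InRange graph.length v)

instance (set : List Int) (graph : List (List Int)) : Decidable (Pre_is_valid_tree set graph) := by
  unfold Pre_is_valid_tree; infer_instance

def pvWitness_is_valid_tree : List Int × List (List Int) := ([0, 0, 0], [[1, 2], [0], [0]])

def Spec_is_valid_tree (set : List Int) (graph : List (List Int)) (out : Bool) : Prop := out = is_valid_tree_alt set graph
instance (set : List Int) (graph : List (List Int)) (out : Bool) : Decidable (Spec_is_valid_tree set graph out) := by unfold Spec_is_valid_tree; infer_instance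

-- ===== CLAIM (what is proved, stated in full; the proofs are below) =====
def Claim_equal_is_valid_tree : Prop := ∀ (set : List Int) (graph : List (List Int)), Dom_is_valid_tree set graph → Pre_is_valid_tree set graph → Spec_is_valid_tree set graph (is_valid_tree set graph)

-- ===== LEMMAS AND PROOFS =====

theorem cycA_nil (graph : List (List Int)) (fuel : Nat) (seen : PySem.Dict Int Bool) (index parent : Int) :
    cycA graph fuel [] seen index parent = some (false, seen) := by rw [cycA.eq_def]

theorem cycA_seen_ne (graph : List (List Int)) (fuel : Nat) (node : Int) (rest : List Int)
    (seen : PySem.Dict Int Bool) (index parent : Int)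
    (h1 : seen.contains node = true) (h2 : parent ≠ node) :
    cycA graph fuel (node :: rest) seen index parent = some (true, seen) := by
  rw [cycA.eq_def]; simp [h1, h2]

theorem cycA_seen_eq (graph : List (List Int)) (fuel : Nat) (node : Int) (rest : List Int)
    (seen : PySem.Dict Int Bool) (index parent : Int)
    (h1 : seen.contains node = true) (h2 : parent = node) :
    cycA graph fuel (node :: rest) seen index parent = cycA graph fuel rest seen index parent := by
  rw [cycA.eq_def]; simp [h1, h2]

theorem cycA_unseen (graph : List (List Int)) (f : Nat) (node : Int) (rest : List Int)
    (seen : PySem.Dict Int Bool) (index parent : Int) (row : List Int)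
    (h1 : seen.contains node = false) (hrow : PySem.List.pyGet? graph node = some row) :
    cycA graph (f + 1) (node :: rest) seen index parent =
      match cycA graph f row (seen.insert node true) node index with
      | none => none
      | some (true, s) => some (true, s)
      | some (false, s) => cycA graph (f + 1) rest s index parent := by
  rw [cycA.eq_def]; simp [h1, hrow]
theorem loopB_nil (graph : List (List Int)) (seen : PySem.Dict Int Bool) :
    loopB graph [] seen = some true := by rw [loopB.eq_def]

theorem loopB_cons_done (graph : List (List Int)) (node parent : Int) (i : Nat)
    (st : List (Int × Int × Nat)) (seen : PySem.Dict Int Bool) (row : List Int)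
    (hrow : PySem.List.pyGet? graph node = some row) (hi : ¬ i < row.length) :
    loopB graph ((node, parent, i) :: st) seen = loopB graph st seen := by
  rw [loopB.eq_def]; simp [hrow, hi]

theorem loopB_cons_seen_ne (graph : List (List Int)) (node parent : Int) (i : Nat)
    (st : List (Int × Int × Nat)) (seen : PySem.Dict Int Bool) (row : List Int)
    (hrow : PySem.List.pyGet? graph node = some row) (hi : i < row.length)
    (hc : seen.contains row[i] = true) (hne : row[i] ≠ parent) :
    loopB graph ((node, parent, i) :: st) seen = some false := by
  rw [loopB.eq_def]; simp [hrow, hi, hc, hne]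

theorem loopB_cons_seen_eq (graph : List (List Int)) (node parent : Int) (i : Nat)
    (st : List (Int × Int × Nat)) (seen : PySem.Dict Int Bool) (row : List Int)
    (hrow : PySem.List.pyGet? graph node = some row) (hi : i < row.length)
    (hc : seen.contains row[i] = true) (hne : row[i] = parent) :
    loopB graph ((node, parent, i) :: st) seen = loopB graph ((node, parent, i + 1) :: st) seen := by
  rw [loopB.eq_def]; simp [hrow, hi, hne]
  intro h; rw [hne] at hc; rw [hc] at h; cases h

theorem loopB_cons_unseen (graph : List (List Int)) (node parent : Int) (i : Nat)
    (st : List (Int × Int × Nat)) (seen : PySem.Dict Int Bool) (row : List Int)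
    (hrow : PySem.List.pyGet? graph node = some row) (hi : i < row.length)
    (hc : seen.contains row[i] = false) :
    loopB graph ((node, parent, i) :: st) seen =
      loopB graph ((row[i], node, 0) :: (node, parent, i + 1) :: st) (seen.insert row[i] true) := by
  rw [loopB.eq_def]; simp [hrow, hi, hc]
theorem cycA_unseen_zero (graph : List (List Int)) (node : Int) (rest : List Int)
    (seen : PySem.Dict Int Bool) (index parent : Int) (h1 : seen.contains node = false) :
    cycA graph 0 (node :: rest) seen index parent = none := by
  rw [cycA.eq_def]; simp [h1]

theorem cycA_unseen_none (graph : List (List Int)) (f : Nat) (node : Int) (rest : List Int)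
    (seen : PySem.Dict Int Bool) (index parent : Int)
    (h1 : seen.contains node = false) (hrow : PySem.List.pyGet? graph node = none) :
    cycA graph (f + 1) (node :: rest) seen index parent = none := by
  rw [cycA.eq_def]; simp [h1, hrow]

theorem cycA_mono (graph : List (List Int)) (fuel : Nat) (pending : List Int)
    (seen : PySem.Dict Int Bool) (index parent : Int) :
    ∀ (b : Bool) (s : PySem.Dict Int Bool),
      cycA graph fuel pending seen index parent = some (b, s) →
      ∀ k, seen.contains k = true → s.contains k = true := by
  induction fuel, pending, seen, index, parent using cycA.induct (graph := graph) with
  | case1 _fuel seen _i _p =>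
    intro b s h k hk; rw [cycA_nil] at h
    cases h; exact hk
  | case2 fuel node rest seen index parent h1 h2 =>
    intro b s h k hk; rw [cycA_seen_ne graph fuel node rest seen index parent h1 h2] at h
    cases h; exact hk
  | case3 fuel node rest seen index parent h1 h2 ih =>
    intro b s h k hk
    rw [cycA_seen_eq graph fuel node rest seen index parent h1 (not_not.mp h2)] at h
    exact ih b s h k hk
  | case4 node rest seen index parent h1 =>
    intro b s h k hk
    rw [cycA_unseen_zero graph node rest seen index parent (Bool.not_eq_true _ ▸ h1)] at h
    cases h
  | case5 node rest seen index parent h1 f hrow =>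
    intro b s h k hk
    rw [cycA_unseen_none graph f node rest seen index parent (Bool.not_eq_true _ ▸ h1) hrow] at h
    cases h
  | case6 node rest seen index parent h1 f row hrow hinner ih =>
    intro b s h k hk
    rw [cycA_unseen graph f node rest seen index parent row (Bool.not_eq_true _ ▸ h1) hrow,
      hinner] at h
    cases h
  | case7 node rest seen index parent h1 f row hrow s1 hinner ih =>
    intro b s h k hk
    rw [cycA_unseen graph f node rest seen index parent row (Bool.not_eq_true _ ▸ h1) hrow,
      hinner] at h
    cases h
    exact ih true s1 hinner k (by simp [PySem.Dict.contains_insert, hk])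
  | case8 node rest seen index parent h1 f row hrow s1 hinner ih1 ih2 =>
    intro b s h k hk
    rw [cycA_unseen graph f node rest seen index parent row (Bool.not_eq_true _ ▸ h1) hrow,
      hinner] at h
    exact ih2 b s h k (ih1 false s1 hinner k (by simp [PySem.Dict.contains_insert, hk]))
theorem pool_inrange (graph : List (List Int))
    (hg : ∀ row ∈ graph, ∀ v ∈ row, PySem.Raise.InRange graph.length v) (h0 : graph ≠ [])
    (k : Int) (hk : k ∈ poolB graph) : PySem.Raise.InRange graph.length k := by
  rcases List.mem_cons.mp hk with rfl | hmem
  · have : 0 < graph.length := List.length_pos_of_ne_nil h0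
    constructor <;> omega
  · obtain ⟨row, hrow, hv⟩ := List.mem_flatten.mp hmem
    exact hg row hrow k hv

theorem pyGet?_isSome_of_pool (graph : List (List Int))
    (hg : ∀ row ∈ graph, ∀ v ∈ row, PySem.Raise.InRange graph.length v) (h0 : graph ≠ [])
    (k : Int) (hk : k ∈ poolB graph) : PySem.List.pyGet? graph k ≠ none := by
  intro hnone
  exact (PySem.List.pyGet?_eq_none_iff graph k).mp hnone (pool_inrange graph hg h0 k hk)

theorem ucnt_le_of_grow (graph : List (List Int)) (d d' : PySem.Dict Int Bool)
    (h : ∀ k, d.contains k = true → d'.contains k = true) :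
    ucnt graph d' ≤ ucnt graph d := by
  apply filter_len_le
  intro x hx
  simp only [Bool.not_eq_true'] at hx ⊢
  cases hc : d.contains x
  · rfl
  · rw [h x hc] at hx; cases hx

theorem cycA_suf (graph : List (List Int))
    (hg : ∀ row ∈ graph, ∀ v ∈ row, PySem.Raise.InRange graph.length v) (h0 : graph ≠ []) :
    ∀ (fuel : Nat) (pending : List Int) (seen : PySem.Dict Int Bool) (index parent : Int),
      (∀ v ∈ pending, v ∈ poolB graph) → ucnt graph seen < fuel →
      cycA graph fuel pending seen index parent ≠ none := by
  intro fuel pending seen index parent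
  induction fuel, pending, seen, index, parent using cycA.induct (graph := graph) with
  | case1 _fuel seen _i _p =>
    intro _ _; rw [cycA_nil]; simp
  | case2 fuel node rest seen index parent h1 h2 =>
    intro _ _; rw [cycA_seen_ne graph fuel node rest seen index parent h1 h2]; simp
  | case3 fuel node rest seen index parent h1 h2 ih =>
    intro hp hf
    rw [cycA_seen_eq graph fuel node rest seen index parent h1 (not_not.mp h2)]
    exact ih (fun v hv => hp v (List.mem_cons_of_mem _ hv)) hf
  | case4 node rest seen index parent h1 =>
    intro _ hf; omega
  | case5 node rest seen index parent h1 f hrow =>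
    intro hp _
    exact absurd hrow (pyGet?_isSome_of_pool graph hg h0 node (hp node List.mem_cons_self))
  | case6 node rest seen index parent h1 f row hrow hinner ih =>
    intro hp hf
    have h1' : seen.contains node = false := Bool.not_eq_true _ ▸ h1
    refine absurd hinner (ih ?_ ?_)
    · intro v hv
      exact List.mem_cons_of_mem _ (List.mem_flatten.mpr ⟨row, PySem.List.mem_of_pyGet?_eq_some _ hrow, hv⟩)
    · have := ucnt_insert_lt graph seen node (hp node List.mem_cons_self) h1'
      omega
  | case7 node rest seen index parent h1 f row hrow s1 hinner ih =>
    intro _ _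
    rw [cycA_unseen graph f node rest seen index parent row (Bool.not_eq_true _ ▸ h1) hrow, hinner]
    simp
  | case8 node rest seen index parent h1 f row hrow s1 hinner ih1 ih2 =>
    intro hp hf
    have h1' : seen.contains node = false := Bool.not_eq_true _ ▸ h1
    rw [cycA_unseen graph f node rest seen index parent row h1' hrow, hinner]
    refine ih2 (fun v hv => hp v (List.mem_cons_of_mem _ hv)) ?_
    have hmono := cycA_mono graph f row (seen.insert node true) node index false s1 hinner
    have hgrow : ucnt graph s1 ≤ ucnt graph (seen.insert node true) :=
      ucnt_le_of_grow graph _ _ hmono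
    have hins := ucnt_insert_lt graph seen node (hp node List.mem_cons_self) h1'
    omega
theorem drop_head_eq (row : List Int) (i : Nat) (x : Int) (xs : List Int)
    (h : row.drop i = x :: xs) : i < row.length ∧ row[i]? = some x ∧ row.drop (i + 1) = xs := by
  have hi : i < row.length := by
    by_contra hge
    rw [List.drop_eq_nil_of_le (by omega)] at h; cases h
  rw [List.drop_eq_getElem_cons hi] at h
  obtain ⟨h1, h2⟩ := List.cons.inj h
  exact ⟨hi, by rw [List.getElem?_eq_getElem hi, h1], h2⟩

theorem sim (graph : List (List Int)) (fuel : Nat) (pending : List Int)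
    (seen : PySem.Dict Int Bool) (index parent : Int) :
    ∀ (stack : List (Int × Int × Nat)) (row : List Int) (i : Nat),
    PySem.List.pyGet? graph index = some row → pending = row.drop i →
    ∀ (b : Bool) (s : PySem.Dict Int Bool),
    cycA graph fuel pending seen index parent = some (b, s) →
    loopB graph ((index, parent, i) :: stack) seen =
      (if b then some false else loopB graph stack s) := by
  induction fuel, pending, seen, index, parent using cycA.induct (graph := graph) with
  | case1 _fuel seen index parent =>
    intro stack row i hrow hdrop b s h
    rw [cycA_nil] at h
    cases h
    have hi : ¬ i < row.length := by
      by_contra hlt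
      rw [List.drop_eq_getElem_cons hlt] at hdrop; cases hdrop
    rw [loopB_cons_done graph index parent i stack seen row hrow hi]
    simp
  | case2 fuel node rest seen index parent h1 h2 =>
    intro stack row i hrow hdrop b s h
    rw [cycA_seen_ne graph fuel node rest seen index parent h1 h2] at h
    cases h
    obtain ⟨hi, hx, _⟩ := drop_head_eq row i node rest hdrop.symm
    have hx' : row[i] = node := by simpa [List.getElem?_eq_getElem hi] using hx
    rw [loopB_cons_seen_ne graph index parent i stack seen row hrow hi
      (by rw [hx']; exact h1) (by rw [hx']; exact fun hh => h2 hh.symm)]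
    simp
  | case3 fuel node rest seen index parent h1 h2 ih =>
    intro stack row i hrow hdrop b s h
    rw [cycA_seen_eq graph fuel node rest seen index parent h1 (not_not.mp h2)] at h
    obtain ⟨hi, hx, hrest⟩ := drop_head_eq row i node rest hdrop.symm
    have hx' : row[i] = node := by simpa [List.getElem?_eq_getElem hi] using hx
    rw [loopB_cons_seen_eq graph index parent i stack seen row hrow hi
      (by rw [hx']; exact h1) (by rw [hx', ← not_not.mp h2])]
    exact ih stack row (i + 1) hrow hrest.symm b s h
  | case4 node rest seen index parent h1 =>
    intro stack row i hrow hdrop b s h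
    rw [cycA_unseen_zero graph node rest seen index parent (Bool.not_eq_true _ ▸ h1)] at h
    cases h
  | case5 node rest seen index parent h1 f hrow2 =>
    intro stack row i hrow hdrop b s h
    rw [cycA_unseen_none graph f node rest seen index parent (Bool.not_eq_true _ ▸ h1) hrow2] at h
    cases h
  | case6 node rest seen index parent h1 f row2 hrow2 hinner ih =>
    intro stack row i hrow hdrop b s h
    rw [cycA_unseen graph f node rest seen index parent row2 (Bool.not_eq_true _ ▸ h1) hrow2,
      hinner] at h
    cases h
  | case7 node rest seen index parent h1 f row2 hrow2 s1 hinner ih =>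
    intro stack row i hrow hdrop b s h
    have h1' : seen.contains node = false := Bool.not_eq_true _ ▸ h1
    rw [cycA_unseen graph f node rest seen index parent row2 h1' hrow2, hinner] at h
    cases h
    obtain ⟨hi, hx, _⟩ := drop_head_eq row i node rest hdrop.symm
    have hx' : row[i] = node := by simpa [List.getElem?_eq_getElem hi] using hx
    rw [loopB_cons_unseen graph index parent i stack seen row hrow hi (by rw [hx']; exact h1'),
      hx']
    have := ih ((index, parent, i + 1) :: stack) row2 0 hrow2 (by simp) true s1 hinner
    rw [this]
    simp
  | case8 node rest seen index parent h1 f row2 hrow2 s1 hinner ih1 ih2 =>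
    intro stack row i hrow hdrop b s h
    have h1' : seen.contains node = false := Bool.not_eq_true _ ▸ h1
    rw [cycA_unseen graph f node rest seen index parent row2 h1' hrow2, hinner] at h
    obtain ⟨hi, hx, hrest⟩ := drop_head_eq row i node rest hdrop.symm
    have hx' : row[i] = node := by simpa [List.getElem?_eq_getElem hi] using hx
    rw [loopB_cons_unseen graph index parent i stack seen row hrow hi (by rw [hx']; exact h1'),
      hx']
    have hstep := ih1 ((index, parent, i + 1) :: stack) row2 0 hrow2 (by simp) false s1 hinner
    rw [hstep, if_neg (by simp)]
    exact ih2 stack row (i + 1) hrow hrest.symm b s h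
theorem scanA_all (set : List Int) (root : Int) (l : List Int) :
    scanA set root l = l.all (fun i => PySem.List.pyGetD set i root == root) := by
  induction l with
  | nil => simp [scanA]
  | cons i rest ih =>
    by_cases h : PySem.List.pyGetD set i root = root <;> simp [scanA, h, ih]

theorem scan_eq (set : List Int) (root : Int) :
    scanA set root (PySem.List.pyRange 0 (set.length : Int) 1) = set.all (fun v => v == root) := by
  rw [scanA_all, PySem.List.pyRange_zero_natCast, List.all_map]
  rw [Bool.eq_iff_iff]
  simp only [List.all_eq_true, List.mem_range, Function.comp_apply, PySem.List.pyGetD_natCast]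
  constructor
  · intro h v hv
    obtain ⟨i, hi, rfl⟩ := List.mem_iff_getElem.mp hv
    have := h i hi
    rwa [List.getD_eq_getElem _ _ hi] at this
  · intro h i hi
    rw [List.getD_eq_getElem _ _ hi]
    exact h _ (List.getElem_mem hi)

-- ===== VERDICT (by name: the statement is the Claim_ definition above) =====
theorem is_valid_tree_spec : Claim_equal_is_valid_tree := by
  unfold Claim_equal_is_valid_tree
  intro set graph _hdom hpre
  unfold Spec_is_valid_tree
  obtain ⟨hne, hrest⟩ := hpre
  cases set with
  | nil => exact absurd rfl hne
  | cons r t =>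
  unfold is_valid_tree is_valid_tree_alt
  rw [PySem.List.pyGet?_zero_cons]
  dsimp only
  by_cases hall : (r :: t).all (fun v => v == r) = true
  · -- the equal-root scan passes in both programs
    have hany : (r :: t).any (fun v => decide ¬ (v = r)) = false := by
      simp only [List.all_eq_true] at hall
      simp only [List.any_eq_false]
      intro x hx
      simpa using eq_of_beq (hall x hx)
    rw [scan_eq, hall, hany]
    simp only [Bool.false_eq_true]
    obtain ⟨hg0, hgr⟩ := hrest (by
      intro v hv
      simpa using eq_of_beq ((List.all_eq_true.mp hall) v hv))
    -- A's DFS returns a value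
    have hsuf := cycA_suf graph hgr hg0 (graph.flatten.length + 2) [0] PySem.Dict.empty (-1) (-1)
      (by intro v hv; simp at hv; subst hv; exact List.mem_cons_self)
      (by
        have h1 : ucnt graph PySem.Dict.empty ≤ (poolB graph).length := List.length_filter_le _ _
        have h2 : (poolB graph).length = graph.flatten.length + 1 := by simp [poolB]
        omega)
    cases hres : cycA graph (graph.flatten.length + 2) [0] PySem.Dict.empty (-1) (-1) with
    | none => exact absurd hres hsuf
    | some p =>
      obtain ⟨b, s⟩ := p
      -- unfold A's first DFS step: visiting node 0
      have h0c : (PySem.Dict.empty : PySem.Dict Int Bool).contains (0 : Int) = false := rfl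
      have h0in : PySem.Raise.InRange graph.length 0 := by
        have : 0 < graph.length := List.length_pos_of_ne_nil hg0
        constructor <;> omega
      obtain ⟨row0, hrow0⟩ : ∃ row0, PySem.List.pyGet? graph 0 = some row0 := by
        cases hh : PySem.List.pyGet? graph 0 with
        | none => exact absurd ((PySem.List.pyGet?_eq_none_iff _ _).mp hh h0in) (fun x => x)
        | some row0 => exact ⟨row0, rfl⟩
      rw [show graph.flatten.length + 2 = (graph.flatten.length + 1) + 1 from rfl,
        cycA_unseen graph (graph.flatten.length + 1) 0 [] PySem.Dict.empty (-1) (-1) row0 h0c hrow0]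
        at hres
      cases hinner : cycA graph (graph.flatten.length + 1) row0 (PySem.Dict.empty.insert 0 true) 0 (-1) with
      | none => rw [hinner] at hres; cases hres
      | some q =>
        obtain ⟨b1, s1⟩ := q
        have hloop := sim graph (graph.flatten.length + 1) row0 (PySem.Dict.empty.insert 0 true)
          0 (-1) [] row0 0 hrow0 (by simp) b1 s1 hinner
        rw [hloop]
        rw [hinner] at hres
        cases b1 with
        | true =>
          dsimp only at hres
          cases hres
          simp
        | false =>
          dsimp only at hres
          rw [cycA_nil] at hres
          cases hres
          simp [loopB_nil]
  · have hall' : (r :: t).all (fun v => v == r) = false := Bool.not_eq_true _ ▸ hall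
    have hany : (r :: t).any (fun v => decide ¬ (v = r)) = true := by
      simp only [List.all_eq_false] at hall'
      obtain ⟨x, hx, hxr⟩ := hall'
      simp only [List.any_eq_true]
      exact ⟨x, hx, by simpa using fun hh => hxr (by simp [hh])⟩
    rw [scan_eq, hall', hany]
    simp
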